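-- pv_equiv track=rewrite | github.com/techwiz42/agent_framework | backend/app/services/agents/business_agent.py | _generate_stakeholder_management_strategies
-- ===== SOURCE A (Python) =====
-- from typing import Dict, Any, Optional, List, Union
--
-- def _generate_stakeholder_management_strategies(
--
--     stakeholders: List[str],
--     initiative_type: str
-- ) -> List[Dict[str, str]]:
--     """
--     Generate stakeholder management strategies.
--
--     Args:
--         stakeholders: List of stakeholder names/groups.
--         initiative_type: Type of initiative.
--
--     Returns:
--         List of stakeholder management strategy dictionaries.
--     """
--     stakeholder_strategies = []
--
--     for stakeholder in stakeholders:
--         # Determine stakeholder type/category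
--         stakeholder_lower = stakeholder.lower()
--
--         if any(term in stakeholder_lower for term in ["executive", "ceo", "cfo", "cio", "cto", "board", "director"]):
--             stakeholder_type = "executive"
--         elif any(term in stakeholder_lower for term in ["manager", "head", "lead", "supervisor"]):
--             stakeholder_type = "manager"
--         elif any(term in stakeholder_lower for term in ["employee", "staff", "team", "personnel"]):
--             stakeholder_type = "employee"
--         elif any(term in stakeholder_lower for term in ["customer", "client", "user", "patient"]):
--             stakeholder_type = "customer"
--         elif any(term in stakeholder_lower for term in ["vendor", "supplier", "partner"]):
--             stakeholder_type = "partner"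
--         else:
--             stakeholder_type = "general"
--
--         # Generate communication strategy based on stakeholder type
--         if stakeholder_type == "executive":
--             communication = "Regular executive briefings focused on strategic impact, ROI, and key milestones"
--         elif stakeholder_type == "manager":
--             communication = "Detailed status updates on progress, issues, and resource utilization with emphasis on operational impacts"
--         elif stakeholder_type == "employee":
--             communication = "Clear communication on changes, impacts to roles and responsibilities, and training opportunities"
--         elif stakeholder_type == "customer":
--             communication = "Targeted communication on value proposition, timing, and any potential service impacts during implementation"
--         elif stakeholder_type == "partner":
--             communication = "Proactive updates on changes affecting partnerships, integration requirements, and timeline implications"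
--         else:
--             communication = "Regular updates tailored to stakeholder's specific interests and involvement"
--
--         # Generate engagement approach based on stakeholder type and initiative
--         if stakeholder_type == "executive":
--             if initiative_type in ["digital_transformation", "restructuring", "m_and_a"]:
--                 engagement = "Involve in key strategic decisions and governance oversight with regular steering committee participation"
--             else:
--                 engagement = "Engage through governance processes with focus on strategic alignment and resource allocation decisions"
--
--         elif stakeholder_type == "manager":
--             if initiative_type in ["optimization", "restructuring"]:
--                 engagement = "Actively involve in process design and implementation planning to leverage operational expertise and ensure buy-in"
--             else:
--                 engagement = "Engage as functional representatives to provide domain expertise and manage team implementation activities"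
--
--         elif stakeholder_type == "employee":
--             engagement = "Involve select representatives in working groups to provide input and serve as change champions within their teams"
--
--         elif stakeholder_type == "customer":
--             if initiative_type == "product_launch":
--                 engagement = "Engage select customers in beta testing and feedback processes to refine offering"
--             else:
--                 engagement = "Collect feedback on current pain points and validate proposed solutions through customer research activities"
--
--         elif stakeholder_type == "partner":
--             engagement = "Collaborate on integration requirements and timeline coordination to ensure alignment"
--
--         else:
--             engagement = "Tailor engagement based on influence and interest levels with appropriate involvement in relevant activities"
--
--         stakeholder_strategies.append({
--             "stakeholder_group": stakeholder,
--             "stakeholder_type": stakeholder_type,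
--             "communication_strategy": communication,
--             "engagement_approach": engagement
--         })
--
--     return stakeholder_strategies
-- ===== SOURCE B (Python) =====
-- from typing import Dict, List
--
-- # Flat keyword index: every keyword maps to the priority of its stakeholder group
-- # (0=executive .. 4=partner).  Classification = the smallest priority among all
-- # keywords occurring in the lowercased name (min with default 5 = "general"),
-- # which equals A's first-matching-group rule because lower priorities win.
-- _GROUPS = [
--     ("executive", ["executive", "ceo", "cfo", "cio", "cto", "board", "director"]),
--     ("manager", ["manager", "head", "lead", "supervisor"]),
--     ("employee", ["employee", "staff", "team", "personnel"]),
--     ("customer", ["customer", "client", "user", "patient"]),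
--     ("partner", ["vendor", "supplier", "partner"]),
-- ]
-- _KW_PRIO = {kw: i for i, (_t, kws) in enumerate(_GROUPS) for kw in kws}
-- _TYPES = [t for t, _kws in _GROUPS] + ["general"]
--
-- _COMM = [
--     "Regular executive briefings focused on strategic impact, ROI, and key milestones",
--     "Detailed status updates on progress, issues, and resource utilization with emphasis on operational impacts",
--     "Clear communication on changes, impacts to roles and responsibilities, and training opportunities",
--     "Targeted communication on value proposition, timing, and any potential service impacts during implementation",
--     "Proactive updates on changes affecting partnerships, integration requirements, and timeline implications",
--     "Regular updates tailored to stakeholder's specific interests and involvement",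
-- ]
--
-- # (initiatives that trigger the special approach, special approach, default approach)
-- _ENG = [
--     (["digital_transformation", "restructuring", "m_and_a"],
--      "Involve in key strategic decisions and governance oversight with regular steering committee participation",
--      "Engage through governance processes with focus on strategic alignment and resource allocation decisions"),
--     (["optimization", "restructuring"],
--      "Actively involve in process design and implementation planning to leverage operational expertise and ensure buy-in",
--      "Engage as functional representatives to provide domain expertise and manage team implementation activities"),
--     ([],
--      "Involve select representatives in working groups to provide input and serve as change champions within their teams",
--      "Involve select representatives in working groups to provide input and serve as change champions within their teams"),
--     (["product_launch"],
--      "Engage select customers in beta testing and feedback processes to refine offering",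
--      "Collect feedback on current pain points and validate proposed solutions through customer research activities"),
--     ([],
--      "Collaborate on integration requirements and timeline coordination to ensure alignment",
--      "Collaborate on integration requirements and timeline coordination to ensure alignment"),
--     ([],
--      "Tailor engagement based on influence and interest levels with appropriate involvement in relevant activities",
--      "Tailor engagement based on influence and interest levels with appropriate involvement in relevant activities"),
-- ]
--
--
-- def _generate_stakeholder_management_strategies(
--     stakeholders: List[str],
--     initiative_type: str
-- ) -> List[Dict[str, str]]:
--     # Stage 1: resolve the initiative-dependent parts once, building the six
--     # complete per-type records before looking at any stakeholder.
--     records = []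
--     for t, comm, (specials, special, default) in zip(_TYPES, _COMM, _ENG):
--         records.append({
--             "stakeholder_type": t,
--             "communication_strategy": comm,
--             "engagement_approach": special if initiative_type in specials else default,
--         })
--     # Stage 2: per stakeholder only a flat keyword scan + min; no branching.
--     out = []
--     for s in stakeholders:
--         low = s.lower()
--         hits = [p for kw, p in _KW_PRIO.items() if kw in low]
--         out.append({"stakeholder_group": s, **records[min(hits) if hits else 5]})
--     return out
-- ===== Notes on version B (the rewrite author's own statement) =====
-- stated objective: alternative
-- what changed: Classification now uses a flat keyword->priority index and takes min(matched priorities, default=general) instead of A's ordered if/elif any() cascade, and the initiative-dependent communication/engagement branching is hoisted out of the per-stakeholder loop into six complete records built once per call, so the per-element work is a flat scan plus a table index with no branching.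
import Mathlib
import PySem

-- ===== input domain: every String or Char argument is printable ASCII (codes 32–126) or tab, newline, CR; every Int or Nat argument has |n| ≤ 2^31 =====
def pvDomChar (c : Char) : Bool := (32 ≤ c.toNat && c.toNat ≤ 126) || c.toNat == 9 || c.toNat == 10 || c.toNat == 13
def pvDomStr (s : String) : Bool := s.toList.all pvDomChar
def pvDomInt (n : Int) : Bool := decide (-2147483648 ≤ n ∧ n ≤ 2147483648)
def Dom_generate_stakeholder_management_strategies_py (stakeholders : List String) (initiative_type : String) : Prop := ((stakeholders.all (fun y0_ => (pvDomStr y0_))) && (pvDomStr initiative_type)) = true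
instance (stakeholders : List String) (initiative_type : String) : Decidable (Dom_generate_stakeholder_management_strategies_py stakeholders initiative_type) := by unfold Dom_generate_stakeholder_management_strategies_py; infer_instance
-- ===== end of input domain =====

-- B classifies via a flat keyword->priority index minimised with default, and hoists the initiative-dependent branching out of the loop into six records built once per call; alternative structure, same results.


-- ===== PORT A =====
def generate_stakeholder_management_strategies_py (stakeholders : List String) (initiative_type : String) : List (List (String × String)) :=
  stakeholders.foldl (fun stakeholder_strategies stakeholder =>
    let stakeholder_lower := PySem.Str.lower stakeholder
    let stakeholder_type :=
      if ["executive", "ceo", "cfo", "cio", "cto", "board", "director"].any (fun term => PySem.Str.isIn term stakeholder_lower) then "executive"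
      else if ["manager", "head", "lead", "supervisor"].any (fun term => PySem.Str.isIn term stakeholder_lower) then "manager"
      else if ["employee", "staff", "team", "personnel"].any (fun term => PySem.Str.isIn term stakeholder_lower) then "employee"
      else if ["customer", "client", "user", "patient"].any (fun term => PySem.Str.isIn term stakeholder_lower) then "customer"
      else if ["vendor", "supplier", "partner"].any (fun term => PySem.Str.isIn term stakeholder_lower) then "partner"
      else "general"
    let communication :=
      if stakeholder_type == "executive" then "Regular executive briefings focused on strategic impact, ROI, and key milestones"
      else if stakeholder_type == "manager" then "Detailed status updates on progress, issues, and resource utilization with emphasis on operational impacts"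
      else if stakeholder_type == "employee" then "Clear communication on changes, impacts to roles and responsibilities, and training opportunities"
      else if stakeholder_type == "customer" then "Targeted communication on value proposition, timing, and any potential service impacts during implementation"
      else if stakeholder_type == "partner" then "Proactive updates on changes affecting partnerships, integration requirements, and timeline implications"
      else "Regular updates tailored to stakeholder's specific interests and involvement"
    let engagement :=
      if stakeholder_type == "executive" then
        (if ["digital_transformation", "restructuring", "m_and_a"].contains initiative_type then
          "Involve in key strategic decisions and governance oversight with regular steering committee participation"
        else "Engage through governance processes with focus on strategic alignment and resource allocation decisions")
      else if stakeholder_type == "manager" then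
        (if ["optimization", "restructuring"].contains initiative_type then
          "Actively involve in process design and implementation planning to leverage operational expertise and ensure buy-in"
        else "Engage as functional representatives to provide domain expertise and manage team implementation activities")
      else if stakeholder_type == "employee" then
        "Involve select representatives in working groups to provide input and serve as change champions within their teams"
      else if stakeholder_type == "customer" then
        (if initiative_type == "product_launch" then
          "Engage select customers in beta testing and feedback processes to refine offering"
        else "Collect feedback on current pain points and validate proposed solutions through customer research activities")
      else if stakeholder_type == "partner" then
        "Collaborate on integration requirements and timeline coordination to ensure alignment"
      else "Tailor engagement based on influence and interest levels with appropriate involvement in relevant activities"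
    stakeholder_strategies ++ [[("stakeholder_group", stakeholder), ("stakeholder_type", stakeholder_type),
      ("communication_strategy", communication), ("engagement_approach", engagement)]]) []

-- ===== PORT B =====
def pvGroups : List (String × List String) :=
  [("executive", ["executive", "ceo", "cfo", "cio", "cto", "board", "director"]),
   ("manager", ["manager", "head", "lead", "supervisor"]),
   ("employee", ["employee", "staff", "team", "personnel"]),
   ("customer", ["customer", "client", "user", "patient"]),
   ("partner", ["vendor", "supplier", "partner"])]

-- _KW_PRIO = {kw: i for i, (_t, kws) in enumerate(_GROUPS) for kw in kws}; all 23 keywords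
-- are distinct, so the dict's items are exactly this flattened list in insertion order.
def pvKwPrio : List (String × Int) :=
  (PySem.List.enumerate pvGroups).flatMap (fun ig => ig.2.2.map (fun kw => (kw, ig.1)))

def pvTypes : List String := pvGroups.map (fun g => g.1) ++ ["general"]

def pvComm : List String :=
  ["Regular executive briefings focused on strategic impact, ROI, and key milestones",
   "Detailed status updates on progress, issues, and resource utilization with emphasis on operational impacts",
   "Clear communication on changes, impacts to roles and responsibilities, and training opportunities",
   "Targeted communication on value proposition, timing, and any potential service impacts during implementation",
   "Proactive updates on changes affecting partnerships, integration requirements, and timeline implications",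
   "Regular updates tailored to stakeholder's specific interests and involvement"]

def pvEng : List (List String × String × String) :=
  [(["digital_transformation", "restructuring", "m_and_a"],
    "Involve in key strategic decisions and governance oversight with regular steering committee participation",
    "Engage through governance processes with focus on strategic alignment and resource allocation decisions"),
   (["optimization", "restructuring"],
    "Actively involve in process design and implementation planning to leverage operational expertise and ensure buy-in",
    "Engage as functional representatives to provide domain expertise and manage team implementation activities"),
   ([],
    "Involve select representatives in working groups to provide input and serve as change champions within their teams",
    "Involve select representatives in working groups to provide input and serve as change champions within their teams"),
   (["product_launch"],
    "Engage select customers in beta testing and feedback processes to refine offering",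
    "Collect feedback on current pain points and validate proposed solutions through customer research activities"),
   ([],
    "Collaborate on integration requirements and timeline coordination to ensure alignment",
    "Collaborate on integration requirements and timeline coordination to ensure alignment"),
   ([],
    "Tailor engagement based on influence and interest levels with appropriate involvement in relevant activities",
    "Tailor engagement based on influence and interest levels with appropriate involvement in relevant activities")]

-- min(hits) if hits else 5
def pvMinOr5 (hits : List Int) : Int :=
  match PySem.List.min? hits (fun x => x) with
  | some m => m
  | none => 5

def generate_stakeholder_management_strategies_py_alt (stakeholders : List String) (initiative_type : String) : List (List (String × String)) :=
  let records := (pvTypes.zip (pvComm.zip pvEng)).foldl (fun records tce =>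
    records ++ [[("stakeholder_type", tce.1),
      ("communication_strategy", tce.2.1),
      ("engagement_approach", if tce.2.2.1.contains initiative_type then tce.2.2.2.1 else tce.2.2.2.2)]]) []
  stakeholders.foldl (fun out s =>
    let low := PySem.Str.lower s
    let hits := pvKwPrio.filterMap (fun p => if PySem.Str.isIn p.1 low then some p.2 else none)
    -- records[...] : the index is always 0..5 and records has 6 entries, so in range
    out ++ [("stakeholder_group", s) :: PySem.List.pyGetD records (pvMinOr5 hits) []]) []

-- ===== PRECONDITION & SPEC =====
def Spec_generate_stakeholder_management_strategies_py (stakeholders : List String) (initiative_type : String) (out : List (List (String × String))) : Prop := out = generate_stakeholder_management_strategies_py_alt stakeholders initiative_type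
instance (stakeholders : List String) (initiative_type : String) (out : List (List (String × String))) : Decidable (Spec_generate_stakeholder_management_strategies_py stakeholders initiative_type out) := by unfold Spec_generate_stakeholder_management_strategies_py; infer_instance

-- ===== CLAIM (what is proved, stated in full; the proofs are below) =====
def Claim_equal_generate_stakeholder_management_strategies_py : Prop := ∀ (stakeholders : List String) (initiative_type : String), Dom_generate_stakeholder_management_strategies_py stakeholders initiative_type → Spec_generate_stakeholder_management_strategies_py stakeholders initiative_type (generate_stakeholder_management_strategies_py stakeholders initiative_type)

-- ===== LEMMAS AND PROOFS =====

-- the five keyword groups of pvKwPrio, with their priorities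
def pvG0 : List (String × Int) := [("executive",0),("ceo",0),("cfo",0),("cio",0),("cto",0),("board",0),("director",0)]
def pvG1 : List (String × Int) := [("manager",1),("head",1),("lead",1),("supervisor",1)]
def pvG2 : List (String × Int) := [("employee",2),("staff",2),("team",2),("personnel",2)]
def pvG3 : List (String × Int) := [("customer",3),("client",3),("user",3),("patient",3)]
def pvG4 : List (String × Int) := [("vendor",4),("supplier",4),("partner",4)]

theorem pvKwPrio_eq : pvKwPrio = pvG0 ++ (pvG1 ++ (pvG2 ++ (pvG3 ++ pvG4))) := by rfl

theorem pvHits_nil (low : String) (l : List (String × Int)) :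
    (List.filterMap (fun p => if PySem.Str.isIn p.1 low then some p.2 else none) l = []) ↔
    (l.any (fun p => PySem.Str.isIn p.1 low) = false) := by
  rw [List.filterMap_eq_nil_iff, List.any_eq_false]
  constructor
  · intro h p hp hin
    have := h p hp
    rw [if_pos hin] at this
    exact Option.some_ne_none _ this
  · intro h p hp
    rw [if_neg (h p hp)]

theorem pvHits_const (low : String) (v : Int) (l : List (String × Int))
    (hl : ∀ p ∈ l, p.2 = v) :
    ∀ x ∈ List.filterMap (fun p => if PySem.Str.isIn p.1 low then some p.2 else none) l, x = v := by
  intro x hx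
  rw [List.mem_filterMap] at hx
  obtain ⟨p, hp, hf⟩ := hx
  split at hf
  · cases hf; exact hl p hp
  · cases hf

theorem pvMinOr5_append_const (a : Int) (xs ys : List Int) (hne : xs ≠ [])
    (hxs : ∀ x ∈ xs, x = a) (hys : ∀ y ∈ ys, a ≤ y) :
    pvMinOr5 (xs ++ ys) = a := by
  unfold pvMinOr5
  cases hm : PySem.List.min? (xs ++ ys) (fun x => x) with
  | none =>
    rw [PySem.List.min?_eq_none_iff] at hm
    rcases List.append_eq_nil_iff.mp hm with ⟨h1, _⟩
    exact absurd h1 hne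
  | some m =>
    have hmem := PySem.List.min?_mem hm
    obtain ⟨x, hx⟩ := List.exists_mem_of_ne_nil xs hne
    have hxa : x = a := hxs x hx
    have hle : m ≤ a := by
      have := PySem.List.min?_isMin hm x (List.mem_append_left ys hx)
      simpa [hxa] using this
    have hge : a ≤ m := by
      rcases List.mem_append.mp hmem with h | h
      · exact (hxs m h).ge
      · exact hys m h
    simp [le_antisymm hle hge]

theorem pvMinOr5_const (a : Int) (xs : List Int) (hne : xs ≠ [])
    (hxs : ∀ x ∈ xs, x = a) :
    pvMinOr5 xs = a := by
  have := pvMinOr5_append_const a xs [] hne hxs (by simp)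
  simpa using this


-- ===== VERDICT (by name: the statement is the Claim_ definition above) =====
set_option maxHeartbeats 2000000 in
theorem generate_stakeholder_management_strategies_py_spec : Claim_equal_generate_stakeholder_management_strategies_py := by
  intro stakeholders initiative_type _
  unfold Spec_generate_stakeholder_management_strategies_py
  unfold generate_stakeholder_management_strategies_py generate_stakeholder_management_strategies_py_alt
  simp only [PySem.List.foldl_append_singleton_eq_map, List.nil_append]
  refine List.map_congr_left (fun s _ => ?_)
  dsimp only
  rw [pvKwPrio_eq, List.filterMap_append, List.filterMap_append, List.filterMap_append, List.filterMap_append]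
  set low := PySem.Str.lower s with hlow
  have c0 := pvHits_const low 0 pvG0 (by decide)
  have c1 := pvHits_const low 1 pvG1 (by decide)
  have c2 := pvHits_const low 2 pvG2 (by decide)
  have c3 := pvHits_const low 3 pvG3 (by decide)
  have c4 := pvHits_const low 4 pvG4 (by decide)
  cases hb0 : (["executive", "ceo", "cfo", "cio", "cto", "board", "director"].any (fun term => PySem.Str.isIn term low)) with
  | true =>
    have hne : List.filterMap (fun p => if PySem.Str.isIn p.1 low then some p.2 else none) pvG0 ≠ [] := by
      intro h
      have h' := (pvHits_nil low pvG0).mp h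
      rw [show pvG0.any (fun p => PySem.Str.isIn p.1 low) = (["executive", "ceo", "cfo", "cio", "cto", "board", "director"].any (fun term => PySem.Str.isIn term low)) from rfl, hb0] at h'
      simp at h'
    rw [pvMinOr5_append_const 0 _ _ hne c0 (by
      intro y hy
      simp only [List.mem_append] at hy
      rcases hy with hy | hy | hy | hy
      · have := c1 y hy; omega
      · have := c2 y hy; omega
      · have := c3 y hy; omega
      · have := c4 y hy; omega)]
    rfl
  | false =>
    have h0nil : List.filterMap (fun p => if PySem.Str.isIn p.1 low then some p.2 else none) pvG0 = [] := by
      refine (pvHits_nil low pvG0).mpr ?_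
      rw [show pvG0.any (fun p => PySem.Str.isIn p.1 low) = (["executive", "ceo", "cfo", "cio", "cto", "board", "director"].any (fun term => PySem.Str.isIn term low)) from rfl]
      exact hb0
    rw [h0nil, List.nil_append]
    cases hb1 : (["manager", "head", "lead", "supervisor"].any (fun term => PySem.Str.isIn term low)) with
    | true =>
      have hne : List.filterMap (fun p => if PySem.Str.isIn p.1 low then some p.2 else none) pvG1 ≠ [] := by
        intro h
        have h' := (pvHits_nil low pvG1).mp h
        rw [show pvG1.any (fun p => PySem.Str.isIn p.1 low) = (["manager", "head", "lead", "supervisor"].any (fun term => PySem.Str.isIn term low)) from rfl, hb1] at h'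
        simp at h'
      rw [pvMinOr5_append_const 1 _ _ hne c1 (by
        intro y hy
        simp only [List.mem_append] at hy
        rcases hy with hy | hy | hy
        · have := c2 y hy; omega
        · have := c3 y hy; omega
        · have := c4 y hy; omega)]
      rfl
    | false =>
      have h1nil : List.filterMap (fun p => if PySem.Str.isIn p.1 low then some p.2 else none) pvG1 = [] := by
        refine (pvHits_nil low pvG1).mpr ?_
        rw [show pvG1.any (fun p => PySem.Str.isIn p.1 low) = (["manager", "head", "lead", "supervisor"].any (fun term => PySem.Str.isIn term low)) from rfl]
        exact hb1
      rw [h1nil, List.nil_append]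
      cases hb2 : (["employee", "staff", "team", "personnel"].any (fun term => PySem.Str.isIn term low)) with
      | true =>
        have hne : List.filterMap (fun p => if PySem.Str.isIn p.1 low then some p.2 else none) pvG2 ≠ [] := by
          intro h
          have h' := (pvHits_nil low pvG2).mp h
          rw [show pvG2.any (fun p => PySem.Str.isIn p.1 low) = (["employee", "staff", "team", "personnel"].any (fun term => PySem.Str.isIn term low)) from rfl, hb2] at h'
          simp at h'
        rw [pvMinOr5_append_const 2 _ _ hne c2 (by
          intro y hy
          simp only [List.mem_append] at hy
          rcases hy with hy | hy
          · have := c3 y hy; omega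
          · have := c4 y hy; omega)]
        rfl
      | false =>
        have h2nil : List.filterMap (fun p => if PySem.Str.isIn p.1 low then some p.2 else none) pvG2 = [] := by
          refine (pvHits_nil low pvG2).mpr ?_
          rw [show pvG2.any (fun p => PySem.Str.isIn p.1 low) = (["employee", "staff", "team", "personnel"].any (fun term => PySem.Str.isIn term low)) from rfl]
          exact hb2
        rw [h2nil, List.nil_append]
        cases hb3 : (["customer", "client", "user", "patient"].any (fun term => PySem.Str.isIn term low)) with
        | true =>
          have hne : List.filterMap (fun p => if PySem.Str.isIn p.1 low then some p.2 else none) pvG3 ≠ [] := by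
            intro h
            have h' := (pvHits_nil low pvG3).mp h
            rw [show pvG3.any (fun p => PySem.Str.isIn p.1 low) = (["customer", "client", "user", "patient"].any (fun term => PySem.Str.isIn term low)) from rfl, hb3] at h'
            simp at h'
          rw [pvMinOr5_append_const 3 _ _ hne c3 (by
            intro y hy
            have := c4 y hy; omega)]
          have hget : PySem.List.pyGetD
              ((pvTypes.zip (pvComm.zip pvEng)).map (fun tce =>
                [("stakeholder_type", tce.1), ("communication_strategy", tce.2.1),
                 ("engagement_approach", if tce.2.2.1.contains initiative_type then tce.2.2.2.1 else tce.2.2.2.2)]))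
              3 [] =
              [("stakeholder_type", "customer"),
               ("communication_strategy", "Targeted communication on value proposition, timing, and any potential service impacts during implementation"),
               ("engagement_approach", if (["product_launch"] : List String).contains initiative_type then
                  "Engage select customers in beta testing and feedback processes to refine offering"
                else "Collect feedback on current pain points and validate proposed solutions through customer research activities")] := rfl
          have hcon : (["product_launch"] : List String).contains initiative_type = (initiative_type == "product_launch") := by
            cases hb : initiative_type == "product_launch"
            · simp only [beq_eq_false_iff_ne] at hb; simp [hb]
            · simp only [beq_iff_eq] at hb; simp [hb]
          rw [hget, hcon]
          rfl
        | false =>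
          have h3nil : List.filterMap (fun p => if PySem.Str.isIn p.1 low then some p.2 else none) pvG3 = [] := by
            refine (pvHits_nil low pvG3).mpr ?_
            rw [show pvG3.any (fun p => PySem.Str.isIn p.1 low) = (["customer", "client", "user", "patient"].any (fun term => PySem.Str.isIn term low)) from rfl]
            exact hb3
          rw [h3nil, List.nil_append]
          cases hb4 : (["vendor", "supplier", "partner"].any (fun term => PySem.Str.isIn term low)) with
          | true =>
            have hne : List.filterMap (fun p => if PySem.Str.isIn p.1 low then some p.2 else none) pvG4 ≠ [] := by
              intro h
              have h' := (pvHits_nil low pvG4).mp h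
              rw [show pvG4.any (fun p => PySem.Str.isIn p.1 low) = (["vendor", "supplier", "partner"].any (fun term => PySem.Str.isIn term low)) from rfl, hb4] at h'
              simp at h'
            rw [pvMinOr5_const 4 _ hne c4]
            rfl
          | false =>
            have h4nil : List.filterMap (fun p => if PySem.Str.isIn p.1 low then some p.2 else none) pvG4 = [] := by
              refine (pvHits_nil low pvG4).mpr ?_
              rw [show pvG4.any (fun p => PySem.Str.isIn p.1 low) = (["vendor", "supplier", "partner"].any (fun term => PySem.Str.isIn term low)) from rfl]
              exact hb4
            rw [h4nil]
            rfl
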